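-- pv_equiv track=rewrite | github.com/matrix-profile-foundation/matrixprofile | matrixprofile/algorithms/skimp.py | binary_split
-- ===== SOURCE A (Python) =====
-- import math
--
-- def split(lower_bound, upper_bound, middle):
--     """
--     Helper function to split the indices for BFS.
--     """
--     if lower_bound == middle:
--         L = None
--         R = [middle + 1, upper_bound]
--     elif upper_bound == middle:
--         L = [lower_bound, middle - 1]
--         R = None
--     else:
--         L = [lower_bound, middle - 1]
--         R = [middle + 1, upper_bound]
--
--     return (L, R)
--
-- def binary_split(n):
--     """
--     Create a breadth first search for indices 0..n.
--
--     Parameters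
--     ----------
--     n : int
--         The length of indices.
--
--     Returns
--     -------
--     array_like :
--         The indices to iterate to perform BFS.
--     """
--     index = []
--     intervals = []
--
--     # always begin by exploring the first integer
--     index.append(0)
--
--     # after exploring first integer, split interval 2:n
--     intervals.append([1, n - 1])
--
--     while len(intervals) > 0:
--         interval = intervals.pop(0)
--         lower_bound = interval[0]
--         upper_bound = interval[1]
--         middle = int(math.floor((lower_bound + upper_bound) / 2))
--         index.append(middle)
--
--         if lower_bound == upper_bound:
--             continue
--         else:
--             L, R = split(lower_bound, upper_bound, middle)
--
--             if L is not None: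
--                 intervals.append(L)
--
--             if R is not None:
--                 intervals.append(R)
--
--     return index
-- ===== SOURCE B (Python) =====
-- def binary_split(n):
--     """Recursive DFS over the binary-split tree of [1, n-1], bucketing each
--     midpoint by its depth; since DFS visits left subtrees before right ones,
--     each depth bucket is already in left-to-right order, so flattening the
--     buckets yields exactly the BFS order A produces."""
--     levels = []
--
--     def dfs(lo, hi, d):
--         if d == len(levels):
--             levels.append([])
--         mid = (lo + hi) // 2
--         levels[d].append(mid)
--         if lo == hi:
--             return
--         if lo != mid:
--             dfs(lo, mid - 1, d + 1)
--         if hi != mid: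
--             dfs(mid + 1, hi, d + 1)
--
--     dfs(1, n - 1, 0)
--     out = [0]
--     for lvl in levels:
--         out.extend(lvl)
--     return out
-- ===== Notes on version B (the rewrite author's own statement) =====
-- stated objective: faster
-- what changed: Replaces A's iterative FIFO-queue BFS (pop(0) on a flat interval queue) with a recursive depth-first traversal of the split tree that buckets midpoints by depth and flattens the buckets, which equals BFS order because DFS emits each depth's midpoints left to right.
-- outside the precondition, e.g. on binary_split(1): A does not finish within the time limit, B raises RecursionError
import Mathlib
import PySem

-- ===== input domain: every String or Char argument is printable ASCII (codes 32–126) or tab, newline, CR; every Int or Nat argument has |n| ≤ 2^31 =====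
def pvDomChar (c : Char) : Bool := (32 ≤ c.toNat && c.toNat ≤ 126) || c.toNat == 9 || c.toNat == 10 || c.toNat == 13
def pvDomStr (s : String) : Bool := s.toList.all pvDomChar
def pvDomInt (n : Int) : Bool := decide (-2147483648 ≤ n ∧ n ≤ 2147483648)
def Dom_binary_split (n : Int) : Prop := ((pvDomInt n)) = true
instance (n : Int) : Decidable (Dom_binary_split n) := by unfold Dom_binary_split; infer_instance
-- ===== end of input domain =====

-- B replaces A's iterative FIFO-queue BFS by a recursive DFS that buckets
-- midpoints by depth and flattens the buckets; same return value on all n ≥ 2.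

-- ===== PORT A =====
-- helper `split` of A, literally: None becomes Option.none
def pySplit (lower_bound upper_bound middle : Int) :
    Option (Int × Int) × Option (Int × Int) :=
  if lower_bound = middle then
    (none, some (middle + 1, upper_bound))
  else if upper_bound = middle then
    (some (lower_bound, middle - 1), none)
  else
    (some (lower_bound, middle - 1), some (middle + 1, upper_bound))

-- A's while loop; fuel bounds the iteration count (n.toNat suffices on Pre_,
-- where the loop runs exactly n-1 times).  int(math.floor((lo+hi)/2)) is ported
-- as floor division, exact here since |lo+hi| ≤ 2^33 < 2^53.
def binary_split_loop (fuel : Nat) (index : List Int) (intervals : List (Int × Int)) :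
    List Int :=
  match fuel, intervals with
  | _, [] => index
  | 0, _ => index
  | fuel + 1, (lower_bound, upper_bound) :: rest =>
    let middle := PySem.Int.floordiv (lower_bound + upper_bound) 2
    let index := index ++ [middle]
    if lower_bound = upper_bound then
      binary_split_loop fuel index rest
    else
      let LR := pySplit lower_bound upper_bound middle
      let rest := match LR.1 with | some l => rest ++ [l] | none => rest
      let rest := match LR.2 with | some r => rest ++ [r] | none => rest
      binary_split_loop fuel index rest

def binary_split (n : Int) : List Int :=
  binary_split_loop n.toNat [0] [(1, n - 1)]

-- ===== PORT B =====
-- Source B's inner recursive dfs: `levels` is the list of depth buckets, `d` the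
-- current depth.  fuel bounds the recursion depth (n.toNat suffices on Pre_,
-- where the recursion depth is at most log2 n + 1).
def bsDfs (fuel : Nat) (levels : List (List Int)) (lo hi : Int) (d : Nat) :
    List (List Int) :=
  match fuel with
  | 0 => levels
  | fuel + 1 =>
    let levels := if d = levels.length then levels ++ [[]] else levels
    let mid := PySem.Int.floordiv (lo + hi) 2
    let levels := levels.modify d (· ++ [mid])
    if lo = hi then levels
    else
      let levels := if lo ≠ mid then bsDfs fuel levels lo (mid - 1) (d + 1) else levels
      if hi ≠ mid then bsDfs fuel levels (mid + 1) hi (d + 1) else levels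

def binary_split_alt (n : Int) : List Int :=
  [0] ++ (bsDfs n.toNat [] 1 (n - 1) 0).flatten

-- ===== PRECONDITION & SPEC =====
-- Pre_ excludes n ≤ 1, on which A's while loop never terminates (A returns no value there).
def Pre_binary_split (n : Int) : Prop := 2 ≤ n
instance (n : Int) : Decidable (Pre_binary_split n) := by unfold Pre_binary_split; infer_instance
def pvWitness_binary_split : Int := (7)

def Spec_binary_split (n : Int) (out : List Int) : Prop := out = binary_split_alt n
instance (n : Int) (out : List Int) : Decidable (Spec_binary_split n out) := by unfold Spec_binary_split; infer_instance

-- ===== CLAIM (what is proved, stated in full; the proofs are below) =====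
def Claim_equal_binary_split : Prop :=
  ∀ (n : Int), Dom_binary_split n → Pre_binary_split n → Spec_binary_split n (binary_split n)

-- ===== LEMMAS AND PROOFS =====

-- the midpoint and children of one interval
def pvMid (p : Int × Int) : Int := PySem.Int.floordiv (p.1 + p.2) 2

def pvKids (p : Int × Int) : List (Int × Int) :=
  if p.1 = p.2 then []
  else (if p.1 ≠ pvMid p then [(p.1, pvMid p - 1)] else [])
       ++ (if p.2 ≠ pvMid p then [(pvMid p + 1, p.2)] else [])

-- mediator: a level-by-level BFS loop over frontiers
def pvLevelLoop (fuel : Nat) (index : List Int) (frontier : List (Int × Int)) :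
    List Int :=
  match fuel, frontier with
  | _, [] => index
  | 0, _ => index
  | fuel + 1, p :: fr =>
    let frontier := p :: fr
    let index := index ++ frontier.map pvMid
    let frontier := frontier.flatMap pvKids
    pvLevelLoop fuel index frontier

-- total size of a queue/frontier: the number of iterations A still has to do
def pvSize (fr : List (Int × Int)) : Nat :=
  (fr.map (fun p => (p.2 - p.1 + 1).toNat)).sum

def pvInv (fr : List (Int × Int)) : Prop :=
  ∀ p ∈ fr, 1 ≤ p.1 ∧ p.1 ≤ p.2

theorem pvMid_bounds {lo hi : Int} (h : lo ≤ hi) :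
    lo ≤ pvMid (lo, hi) ∧ pvMid (lo, hi) ≤ hi := by
  simpa [pvMid] using PySem.Int.floordiv_two_mid_bounds (lo := lo) (hi := hi) h

-- one step of A's loop, in terms of pvKids
theorem loopA_step (f : Nat) (idx : List Int) (lo hi : Int) (rest : List (Int × Int)) :
    binary_split_loop (f + 1) idx ((lo, hi) :: rest)
      = binary_split_loop f (idx ++ [pvMid (lo, hi)]) (rest ++ pvKids (lo, hi)) := by
  by_cases h : lo = hi
  · simp [binary_split_loop, pvKids, pvMid, h]
  · simp only [binary_split_loop, pySplit, pvKids, pvMid, if_neg h]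
    split_ifs with h1 h2 h3 h4 <;>
      first
        | (simp [List.append_assoc]; done)
        | (exfalso; omega)

-- FIFO processing of a queue prefix = the level step of pvLevelLoop
theorem loopA_append (q₁ : List (Int × Int)) :
    ∀ (q₂ : List (Int × Int)) (idx : List Int) (f : Nat),
      binary_split_loop (q₁.length + f) idx (q₁ ++ q₂)
        = binary_split_loop f (idx ++ q₁.map pvMid) (q₂ ++ q₁.flatMap pvKids) := by
  induction q₁ with
  | nil => intro q₂ idx f; simp
  | cons p t ih =>
    intro q₂ idx f
    obtain ⟨lo, hi⟩ := p
    have h0 : ((lo, hi) :: t).length + f = (t.length + f) + 1 := by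
      simp [List.length_cons]
      omega
    rw [h0, List.cons_append, loopA_step, List.append_assoc, ih]
    simp [List.append_assoc]

theorem pvSize_kids {p : Int × Int} (h1 : 1 ≤ p.1) (h2 : p.1 ≤ p.2) :
    pvSize (pvKids p) + 1 = (p.2 - p.1 + 1).toNat := by
  obtain ⟨lo, hi⟩ := p
  simp only at h1 h2
  by_cases h : lo = hi
  · simp [pvKids, pvSize, h]
  · have hm := pvMid_bounds (lo := lo) (hi := hi) h2
    simp only [pvMid] at hm
    rw [PySem.Int.floordiv_eq_ediv_of_pos (by norm_num)] at hm
    simp only [pvKids, pvMid, if_neg h]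
    rw [show PySem.Int.floordiv (lo + hi) 2 = (lo + hi) / 2 from
      PySem.Int.floordiv_eq_ediv_of_pos (by norm_num)]
    split_ifs with ha hb hb <;> simp [pvSize] <;> omega

theorem pvInv_kids {p : Int × Int} (h1 : 1 ≤ p.1) (h2 : p.1 ≤ p.2) :
    pvInv (pvKids p) := by
  obtain ⟨lo, hi⟩ := p
  simp only at h1 h2
  intro q hq
  obtain ⟨q1, q2⟩ := q
  by_cases h : lo = hi
  · simp [pvKids, h] at hq
  · have hm := pvMid_bounds (lo := lo) (hi := hi) h2
    simp only [pvMid] at hm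
    rw [PySem.Int.floordiv_eq_ediv_of_pos (by norm_num)] at hm
    simp only [pvKids, pvMid, if_neg h] at hq
    rw [show PySem.Int.floordiv (lo + hi) 2 = (lo + hi) / 2 from
      PySem.Int.floordiv_eq_ediv_of_pos (by norm_num)] at hq
    split_ifs at hq <;> simp [Prod.ext_iff] at hq <;> exact ⟨by omega, by omega⟩

theorem pvSize_flatMap (fr : List (Int × Int)) (hinv : pvInv fr) :
    pvSize (fr.flatMap pvKids) + fr.length = pvSize fr := by
  induction fr with
  | nil => simp [pvSize]
  | cons p t ih =>
    have hp := hinv p (by simp)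
    have ht : pvInv t := fun q hq => hinv q (by simp [hq])
    have hk := pvSize_kids hp.1 hp.2
    have : pvSize (pvKids p ++ t.flatMap pvKids) = pvSize (pvKids p) + pvSize (t.flatMap pvKids) := by
      simp [pvSize]
    simp only [List.flatMap_cons, List.length_cons, this]
    have h2 : pvSize ((p :: t)) = (p.2 - p.1 + 1).toNat + pvSize t := by simp [pvSize]
    rw [h2, ← ih ht]; omega

theorem pvInv_flatMap (fr : List (Int × Int)) (hinv : pvInv fr) :
    pvInv (fr.flatMap pvKids) := by
  intro q hq
  rcases List.mem_flatMap.1 hq with ⟨p, hp, hq⟩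
  have h := hinv p hp
  exact pvInv_kids h.1 h.2 q hq

theorem pvLen_le_size (fr : List (Int × Int)) (hinv : pvInv fr) :
    fr.length ≤ pvSize fr := by
  induction fr with
  | nil => simp [pvSize]
  | cons p t ih =>
    have hp := hinv p (by simp)
    have ht : pvInv t := fun q hq => hinv q (by simp [hq])
    have : pvSize (p :: t) = (p.2 - p.1 + 1).toNat + pvSize t := by simp [pvSize]
    have := ih ht
    simp only [List.length_cons]
    omega

-- A's queue loop = the level-by-level loop, with enough fuel on both sides
theorem loopA_eq_levelLoop :
    ∀ (k : Nat) (fr : List (Int × Int)) (idx : List Int) (f g : Nat),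
      pvInv fr → pvSize fr ≤ k → pvSize fr ≤ f → pvSize fr ≤ g →
      binary_split_loop f idx fr = pvLevelLoop g idx fr := by
  intro k
  induction k with
  | zero =>
    intro fr idx f g hinv hk _ _
    have : fr = [] := by
      cases fr with
      | nil => rfl
      | cons p t =>
        have hp := hinv p (by simp)
        have : pvSize (p :: t) = (p.2 - p.1 + 1).toNat + pvSize t := by simp [pvSize]
        omega
    subst this
    cases f <;> cases g <;> simp [binary_split_loop, pvLevelLoop]
  | succ k ih =>
    intro fr idx f g hinv hk hf hg
    cases fr with
    | nil => cases f <;> cases g <;> simp [binary_split_loop, pvLevelLoop]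
    | cons p t =>
      have hlen := pvLen_le_size (p :: t) hinv
      have hS1 : 1 ≤ pvSize (p :: t) := by
        simp only [List.length_cons] at hlen; omega
      obtain ⟨g', rfl⟩ : ∃ g', g = g' + 1 := ⟨g - 1, by omega⟩
      have hB : pvLevelLoop (g' + 1) idx (p :: t)
          = pvLevelLoop g' (idx ++ (p :: t).map pvMid)
              ((p :: t).flatMap pvKids) := rfl
      have hfA : f = (p :: t).length + (f - (p :: t).length) := by omega
      have hA : binary_split_loop f idx (p :: t)
          = binary_split_loop (f - (p :: t).length) (idx ++ (p :: t).map pvMid)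
              ((p :: t).flatMap pvKids) := by
        calc binary_split_loop f idx (p :: t)
            = binary_split_loop ((p :: t).length + (f - (p :: t).length)) idx ((p :: t) ++ []) := by
              rw [← hfA]; simp
          _ = _ := by rw [loopA_append]; simp
      rw [hA, hB]
      have hsz := pvSize_flatMap (p :: t) hinv
      have hl1 : 1 ≤ (p :: t).length := by simp
      exact ih _ _ _ _ (pvInv_flatMap _ hinv) (by omega) (by omega) (by omega)

-- ---- merging depth buckets ----

-- pointwise concatenation of two lists of buckets, padding with the longer one
def mergeLv : List (List Int) → List (List Int) → List (List Int)
  | [], ys => ys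
  | x :: xs, [] => x :: xs
  | x :: xs, y :: ys => (x ++ y) :: mergeLv xs ys

theorem mergeLv_nil_right (xs : List (List Int)) : mergeLv xs [] = xs := by
  cases xs <;> rfl

theorem mergeLv_nil_left (ys : List (List Int)) : mergeLv [] ys = ys := rfl

theorem mergeLv_assoc (a b c : List (List Int)) :
    mergeLv (mergeLv a b) c = mergeLv a (mergeLv b c) := by
  induction a generalizing b c with
  | nil => simp [mergeLv_nil_left]
  | cons x xs ih =>
    cases b with
    | nil => simp [mergeLv_nil_left, mergeLv_nil_right]
    | cons y ys =>
      cases c with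
      | nil => simp [mergeLv_nil_right, mergeLv]
      | cons z zs => simp [mergeLv, ih]

theorem mergeLv_length (a b : List (List Int)) :
    (mergeLv a b).length = max a.length b.length := by
  induction a generalizing b with
  | nil => simp [mergeLv_nil_left]
  | cons x xs ih =>
    cases b with
    | nil => simp [mergeLv]
    | cons y ys =>
      simp only [mergeLv, List.length_cons, ih]
      omega

theorem mergeLv_replicate_nil (d : Nat) (levels : List (List Int)) (h : d ≤ levels.length) :
    mergeLv levels (List.replicate d []) = levels := by
  induction d generalizing levels with
  | zero => simp [mergeLv_nil_right]
  | succ d ih =>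
    cases levels with
    | nil => simp at h
    | cons x xs =>
      simp only [List.replicate_succ, mergeLv, List.append_nil]
      rw [ih xs (by simpa using h)]

theorem mergeLv_pad (d : Nat) (a b : List (List Int)) :
    mergeLv (List.replicate d [] ++ a) (List.replicate d [] ++ b)
      = List.replicate d [] ++ mergeLv a b := by
  induction d with
  | zero => simp
  | succ d ih => simp [List.replicate_succ, mergeLv, ih]

-- the spec-side split tree, one level per list, mirroring bsDfs's branching
def pvTree (fuel : Nat) (lo hi : Int) : List (List Int) :=
  match fuel with
  | 0 => []
  | fuel + 1 =>
    let mid := pvMid (lo, hi)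
    if lo = hi then [[mid]]
    else
      [mid] :: mergeLv (if lo ≠ mid then pvTree fuel lo (mid - 1) else [])
                       (if hi ≠ mid then pvTree fuel (mid + 1) hi else [])

-- the buckets of a whole frontier
def pvMany (fuel : Nat) (fr : List (Int × Int)) : List (List Int) :=
  fr.foldr (fun p acc => mergeLv (pvTree fuel p.1 p.2) acc) []

theorem pvMany_append (fuel : Nat) (xs ys : List (Int × Int)) :
    pvMany fuel (xs ++ ys) = mergeLv (pvMany fuel xs) (pvMany fuel ys) := by
  induction xs with
  | nil => simp [pvMany, mergeLv_nil_left]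
  | cons p t ih => simp [pvMany, List.foldr_cons] at ih ⊢; rw [ih, mergeLv_assoc]

-- unfolding pvTree at a non-leaf node
theorem pvTree_node (f : Nat) (lo hi : Int) (h : lo ≠ hi) :
    pvTree (f + 1) lo hi
      = [pvMid (lo, hi)]
        :: mergeLv (if lo ≠ pvMid (lo, hi) then pvTree f lo (pvMid (lo, hi) - 1) else [])
                   (if hi ≠ pvMid (lo, hi) then pvTree f (pvMid (lo, hi) + 1) hi else []) := by
  simp only [pvTree]
  rw [if_neg h]

-- the inner append/modify step of bsDfs, as a mergeLv
theorem bsDfs_bucket_step (m : Int) (levels : List (List Int)) :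
    ∀ (d : Nat), d ≤ levels.length →
    ((if d = levels.length then levels ++ [[]] else levels).modify d (· ++ [m]))
      = mergeLv levels (List.replicate d [] ++ [[m]]) := by
  induction levels with
  | nil =>
    intro d h
    have : d = 0 := by simpa using h
    subst this
    simp [mergeLv, List.modify]
  | cons x xs ih =>
    intro d h
    cases d with
    | zero =>
      rw [if_neg (by simp)]
      simp [List.modify, mergeLv, mergeLv_nil_right]
    | succ d =>
      have h' : d ≤ xs.length := by simpa using h
      have hif : (if d + 1 = (x :: xs).length then (x :: xs) ++ [[]] else x :: xs)
          = x :: (if d = xs.length then xs ++ [[]] else xs) := by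
        by_cases hd : d = xs.length
        · subst hd; simp
        · rw [if_neg (by simp; omega), if_neg hd]
      rw [hif]
      have hmod : (x :: (if d = xs.length then xs ++ [[]] else xs)).modify (d + 1) (· ++ [m])
          = x :: ((if d = xs.length then xs ++ [[]] else xs)).modify d (· ++ [m]) := by
        simp [List.modify]
      rw [hmod, ih d h']
      simp [List.replicate_succ, mergeLv]

-- bsDfs extends the accumulated buckets by the tree of (lo, hi) shifted to depth d
theorem bsDfs_eq (fuel : Nat) :
    ∀ (lo hi : Int) (levels : List (List Int)) (d : Nat), d ≤ levels.length →
      bsDfs fuel levels lo hi d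
        = mergeLv levels (List.replicate d [] ++ pvTree fuel lo hi) := by
  induction fuel with
  | zero =>
    intro lo hi levels d h
    simp [bsDfs, pvTree, mergeLv_replicate_nil d levels h]
  | succ fuel ih =>
    intro lo hi levels d h
    have hstep := bsDfs_bucket_step (PySem.Int.floordiv (lo + hi) 2) levels d h
    by_cases hlh : lo = hi
    · simp only [bsDfs, if_pos hlh]
      rw [hstep]
      simp [pvTree, pvMid, hlh]
    · simp only [bsDfs, if_neg hlh]
      rw [hstep]
      set mid := PySem.Int.floordiv (lo + hi) 2 with hmid
      set A0 := mergeLv levels (List.replicate d [] ++ [[mid]]) with hA0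
      have hA0len : d + 1 ≤ A0.length := by
        rw [hA0, mergeLv_length]
        simp
      set Lt := (if lo ≠ mid then pvTree fuel lo (mid - 1) else []) with hLt
      set Rt := (if hi ≠ mid then pvTree fuel (mid + 1) hi else []) with hRt
      have h3 : (if lo ≠ mid then bsDfs fuel A0 lo (mid - 1) (d + 1) else A0)
          = mergeLv A0 (List.replicate (d + 1) [] ++ Lt) := by
        by_cases hc : lo = mid
        · rw [if_neg (by simpa using hc), hLt, if_neg (by simpa using hc)]
          simp [mergeLv_replicate_nil (d + 1) A0 hA0len]
        · rw [if_pos hc, hLt, if_pos hc, ih]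
          exact hA0len
      rw [h3]
      have h3len : d + 1 ≤ (mergeLv A0 (List.replicate (d + 1) [] ++ Lt)).length := by
        rw [mergeLv_length]; omega
      have h4 : (if hi ≠ mid then
            bsDfs fuel (mergeLv A0 (List.replicate (d + 1) [] ++ Lt)) (mid + 1) hi (d + 1)
          else mergeLv A0 (List.replicate (d + 1) [] ++ Lt))
          = mergeLv (mergeLv A0 (List.replicate (d + 1) [] ++ Lt))
              (List.replicate (d + 1) [] ++ Rt) := by
        by_cases hc : hi = mid
        · rw [if_neg (by simpa using hc), hRt, if_neg (by simpa using hc)]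
          simp [mergeLv_replicate_nil (d + 1) _ h3len]
        · rw [if_pos hc, hRt, if_pos hc, ih]
          exact h3len
      rw [h4, hA0, mergeLv_assoc, mergeLv_assoc, mergeLv_pad (d + 1) Lt Rt]
      congr 1
      have hrep : List.replicate (d + 1) ([] : List Int) ++ mergeLv Lt Rt
          = List.replicate d [] ++ ([] :: mergeLv Lt Rt) := by
        simp [List.replicate_succ']
      rw [hrep, mergeLv_pad d [[mid]] ([] :: mergeLv Lt Rt)]
      congr 1
      rw [pvTree_node fuel lo hi hlh]
      simp only [pvMid]
      rw [← hmid, ← hLt, ← hRt]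
      simp [mergeLv]

-- one node: its tree is its midpoint followed by the buckets of its children
theorem pvMany_singleton (f : Nat) (p : Int × Int) :
    pvMany f [p] = pvTree f p.1 p.2 := by
  show mergeLv (pvTree f p.1 p.2) [] = pvTree f p.1 p.2
  exact mergeLv_nil_right _

theorem pvTree_succ (f : Nat) (lo hi : Int) :
    pvTree (f + 1) lo hi = [pvMid (lo, hi)] :: pvMany f (pvKids (lo, hi)) := by
  by_cases hlh : lo = hi
  · simp only [pvTree, pvKids, if_pos hlh]
    rfl
  · rw [pvTree_node f lo hi hlh]
    simp only [pvKids, if_neg hlh]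
    congr 1
    rw [pvMany_append]
    have hnil : pvMany f ([] : List (Int × Int)) = [] := rfl
    rcases eq_or_ne lo (pvMid (lo, hi)) with hl | hl <;>
      rcases eq_or_ne hi (pvMid (lo, hi)) with hr | hr
    · rw [if_neg (not_not_intro hl), if_neg (not_not_intro hr),
        if_neg (not_not_intro hl), if_neg (not_not_intro hr)]
      rfl
    · rw [if_neg (not_not_intro hl), if_pos hr, if_neg (not_not_intro hl), if_pos hr,
        hnil, pvMany_singleton]
    · rw [if_pos hl, if_neg (not_not_intro hr), if_pos hl, if_neg (not_not_intro hr),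
        hnil, pvMany_singleton, mergeLv_nil_right]
    · rw [if_pos hl, if_pos hr, if_pos hl, if_pos hr, pvMany_singleton, pvMany_singleton]

theorem pvMany_succ (f : Nat) (fr : List (Int × Int)) (hfr : fr ≠ []) :
    pvMany (f + 1) fr = fr.map pvMid :: pvMany f (fr.flatMap pvKids) := by
  induction fr with
  | nil => exact absurd rfl hfr
  | cons p t ih =>
    have hhead : pvMany (f + 1) (p :: t)
        = mergeLv (pvTree (f + 1) p.1 p.2) (pvMany (f + 1) t) := rfl
    rw [hhead, pvTree_succ]
    cases t with
    | nil =>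
      simp only [List.map_cons, List.map_nil, List.flatMap_cons, List.flatMap_nil,
        List.append_nil]
      show mergeLv ([pvMid p] :: pvMany f (pvKids p)) [] = _
      rw [mergeLv_nil_right]
    | cons q u =>
      rw [ih (by simp)]
      show ([pvMid p] ++ (q :: u).map pvMid)
          :: mergeLv (pvMany f (pvKids p)) (pvMany f ((q :: u).flatMap pvKids)) = _
      rw [← pvMany_append]
      simp only [List.map_cons, List.flatMap_cons, List.singleton_append]

theorem pvMany_zero (fr : List (Int × Int)) : pvMany 0 fr = [] := by
  induction fr with
  | nil => rfl
  | cons p t ih =>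
    show mergeLv (pvTree 0 p.1 p.2) (pvMany 0 t) = []
    rw [ih]
    rfl

theorem levelLoop_eq_many (f : Nat) :
    ∀ (idx : List Int) (fr : List (Int × Int)),
      pvLevelLoop f idx fr = idx ++ (pvMany f fr).flatten := by
  induction f with
  | zero =>
    intro idx fr
    cases fr <;> simp [pvLevelLoop, pvMany_zero]
  | succ f ih =>
    intro idx fr
    cases fr with
    | nil => simp [pvLevelLoop, pvMany]
    | cons p t =>
      have hstep : pvLevelLoop (f + 1) idx (p :: t)
          = pvLevelLoop f (idx ++ (p :: t).map pvMid) ((p :: t).flatMap pvKids) := rfl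
      rw [hstep, ih, pvMany_succ f (p :: t) (by simp)]
      simp

-- ===== VERDICT (by name: the statement is the Claim_ definition above) =====
theorem binary_split_spec : Claim_equal_binary_split := by
  intro n _ hpre
  unfold Pre_binary_split at hpre
  unfold Spec_binary_split binary_split binary_split_alt
  have hinv : pvInv [(1, n - 1)] := by
    intro p hp
    simp at hp
    subst hp
    exact ⟨by simp, by simp; omega⟩
  have hS : pvSize [(1, n - 1)] = (n - 1).toNat := by simp [pvSize]
  have h1 : binary_split_loop n.toNat [0] [(1, n - 1)]
      = pvLevelLoop n.toNat [0] [(1, n - 1)] :=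
    loopA_eq_levelLoop n.toNat _ _ _ _ hinv (by omega) (by omega) (by omega)
  rw [h1, levelLoop_eq_many]
  have h2 : pvMany n.toNat [(1, n - 1)] = pvTree n.toNat 1 (n - 1) := by
    simp [pvMany, mergeLv_nil_right]
  have h3 : bsDfs n.toNat [] 1 (n - 1) 0 = pvTree n.toNat 1 (n - 1) := by
    rw [bsDfs_eq n.toNat 1 (n - 1) [] 0 (by simp)]
    simp [mergeLv_nil_left]
  rw [h2, h3]
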